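-- pv_equiv track=rewrite | github.com/gedwards09/advent-of-code | 2024/day-2.py | isRowSafeWithSkip
-- ===== SOURCE A (Python) =====
-- def isRowSafeWithSkip(row, iSkipIndex):
--     iStartIndex = 0 if iSkipIndex > 0 else 1
--     last = row[iStartIndex]
--     iIncreasing = None
--     for i in range(iStartIndex + 1, len(row)):
--         if i == iSkipIndex:
--             continue
--         cur = row[i]
--         if last == cur:
--             return False
--         iSign = 1 if last < cur else -1
--         iDiff = abs(cur - last)
--         if iDiff > 3:
--             return False
--         if iIncreasing == None:
--             iIncreasing = iSign
--         elif iIncreasing * iSign <= 0: # different signs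
--             return False
--         last = cur
--     return True
-- ===== SOURCE B (Python) =====
-- def isRowSafeWithSkip(row, iSkipIndex):
--     # Build the filtered sequence, then check all consecutive diffs at once.
--     # Keeps A's convention: any non-positive iSkipIndex drops index 0.
--     if iSkipIndex > 0:
--         seq = row[:iSkipIndex] + row[iSkipIndex + 1:]
--     else:
--         seq = row[1:]
--     diffs = [b - a for a, b in zip(seq, seq[1:])]
--     return all(1 <= d <= 3 for d in diffs) or all(-3 <= d <= -1 for d in diffs)
-- ===== Notes on version B (the rewrite author's own statement) =====
-- stated objective: simpler
-- what changed: Replaces A's single stateful index loop (tracking last value and a first-pair direction sign with early returns) by a build-then-check decomposition: construct the skipped sequence with slices, take all consecutive differences, and test 'all in [1,3] or all in [-3,-1]'.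
import Mathlib
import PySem

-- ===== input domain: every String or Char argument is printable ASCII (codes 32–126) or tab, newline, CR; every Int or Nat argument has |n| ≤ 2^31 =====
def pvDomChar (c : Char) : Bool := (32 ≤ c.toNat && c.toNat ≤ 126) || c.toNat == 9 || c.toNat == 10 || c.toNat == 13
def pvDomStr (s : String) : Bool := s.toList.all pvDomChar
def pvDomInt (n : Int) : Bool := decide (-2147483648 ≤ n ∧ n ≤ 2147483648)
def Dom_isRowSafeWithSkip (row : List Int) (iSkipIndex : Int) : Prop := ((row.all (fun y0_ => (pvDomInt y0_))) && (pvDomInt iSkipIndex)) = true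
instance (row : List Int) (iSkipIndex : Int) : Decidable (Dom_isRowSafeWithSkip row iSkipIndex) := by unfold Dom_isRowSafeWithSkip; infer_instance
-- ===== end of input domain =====

-- B replaces A's stateful single loop by a build-the-skipped-sequence-then-check-all-diffs decomposition (simpler, same cost).

-- ===== PORT A =====
-- A's for-loop: state (last, iIncreasing), early returns become Bool results
def pvAloop (row : List Int) (iSkipIndex : Int) (last : Int) (iIncreasing : Option Int) : List Int → Bool
  | [] => true
  | i :: rest =>
    if i = iSkipIndex then pvAloop row iSkipIndex last iIncreasing rest
    else
      let cur := PySem.List.pyGetD row i 0   -- row[i]; always in range inside the loop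
      if last = cur then false
      else
        let iSign : Int := if last < cur then 1 else -1
        let iDiff := |cur - last|
        if iDiff > 3 then false
        else
          match iIncreasing with
          | none => pvAloop row iSkipIndex cur (some iSign) rest
          | some v => if v * iSign ≤ 0 then false else pvAloop row iSkipIndex cur (some iSign) rest

def isRowSafeWithSkip (row : List Int) (iSkipIndex : Int) : Bool :=
  let iStartIndex : Int := if iSkipIndex > 0 then 0 else 1
  match PySem.List.pyGet? row iStartIndex with
  | none => false   -- row[iStartIndex] raises IndexError; excluded by Pre_
  | some last => pvAloop row iSkipIndex last none (PySem.List.pyRange (iStartIndex + 1) row.length 1)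

-- ===== PORT B =====
def isRowSafeWithSkip_alt (row : List Int) (iSkipIndex : Int) : Bool :=
  let seq :=
    if iSkipIndex > 0 then
      PySem.List.slice row none (some iSkipIndex) ++ PySem.List.slice row (some (iSkipIndex + 1)) none
    else
      PySem.List.slice row (some 1) none
  let diffs := (seq.zip (PySem.List.slice seq (some 1) none)).map (fun p => p.2 - p.1)
  (diffs.all fun d => decide (1 ≤ d ∧ d ≤ 3)) || (diffs.all fun d => decide (-3 ≤ d ∧ d ≤ -1))

-- ===== PRECONDITION & SPEC =====
-- Pre_ excludes exactly the inputs on which A's initial row[iStartIndex] raises IndexError: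
-- an empty row, or a row of length < 2 with non-positive iSkipIndex.
def Pre_isRowSafeWithSkip (row : List Int) (iSkipIndex : Int) : Prop :=
  if 0 < iSkipIndex then row ≠ [] else 2 ≤ row.length
instance (row : List Int) (iSkipIndex : Int) : Decidable (Pre_isRowSafeWithSkip row iSkipIndex) := by
  unfold Pre_isRowSafeWithSkip; infer_instance
def pvWitness_isRowSafeWithSkip : List Int × Int := ([1, 2, 5, 6], 2)

def Spec_isRowSafeWithSkip (row : List Int) (iSkipIndex : Int) (out : Bool) : Prop :=
  out = isRowSafeWithSkip_alt row iSkipIndex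
instance (row : List Int) (iSkipIndex : Int) (out : Bool) : Decidable (Spec_isRowSafeWithSkip row iSkipIndex out) := by
  unfold Spec_isRowSafeWithSkip; infer_instance

-- ===== CLAIM (what is proved, stated in full; the proofs are below) =====
def Claim_equal_isRowSafeWithSkip : Prop := ∀ (row : List Int) (iSkipIndex : Int), Dom_isRowSafeWithSkip row iSkipIndex → Pre_isRowSafeWithSkip row iSkipIndex → Spec_isRowSafeWithSkip row iSkipIndex (isRowSafeWithSkip row iSkipIndex)

-- ===== LEMMAS AND PROOFS =====

-- element-level version of A's loop (proof device)
def chainA (last : Int) (iIncreasing : Option Int) : List Int → Bool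
  | [] => true
  | cur :: rest =>
    if last = cur then false
    else
      let iSign : Int := if last < cur then 1 else -1
      if |cur - last| > 3 then false
      else
        match iIncreasing with
        | none => chainA cur (some iSign) rest
        | some v => if v * iSign ≤ 0 then false else chainA cur (some iSign) rest

-- the common step of pvAloop (non-skipped index) and chainA
def chainStep (last cur : Int) (inc : Option Int) (next : Option Int → Bool) : Bool :=
  if last = cur then false
  else
    let iSign : Int := if last < cur then 1 else -1
    if |cur - last| > 3 then false
    else
      match inc with
      | none => next (some iSign)
      | some v => if v * iSign ≤ 0 then false else next (some iSign)

-- "every consecutive difference satisfies p" as a recursion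
def chk (p : Int → Bool) : List Int → Bool
  | [] => true
  | [_] => true
  | a :: b :: rest => p (b - a) && chk p (b :: rest)

theorem chk_cons₂ (p : Int → Bool) (a b : Int) (l : List Int) :
    chk p (a :: b :: l) = (p (b - a) && chk p (b :: l)) := rfl

theorem pvAloop_cons_ne (row : List Int) (k last i : Int) (inc : Option Int) (rest : List Int)
    (hk : ¬ i = k) :
    pvAloop row k last inc (i :: rest) =
      chainStep last (PySem.List.pyGetD row i 0) inc
        (fun inc' => pvAloop row k (PySem.List.pyGetD row i 0) inc' rest) := by
  simp only [pvAloop, if_neg hk]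
  rfl

theorem pvAloop_cons_eq (row : List Int) (k last : Int) (inc : Option Int) (rest : List Int) :
    pvAloop row k last inc (k :: rest) = pvAloop row k last inc rest := by
  simp [pvAloop]

theorem chainA_cons (last cur : Int) (inc : Option Int) (rest : List Int) :
    chainA last inc (cur :: rest) =
      chainStep last cur inc (fun inc' => chainA cur inc' rest) := by
  simp only [chainA]
  rfl

-- A's index loop equals chainA on the fetched, skip-filtered elements
theorem pvAloop_eq_chainA (row : List Int) (k : Int) :
    ∀ (m : Nat) (a : Int) (last : Int) (inc : Option Int), 0 ≤ a →
      ((row.length : Int) - a).toNat = m →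
      pvAloop row k last inc (PySem.List.pyRange a row.length 1) =
        chainA last inc (((PySem.List.pyRange a row.length 1).filter
          (fun i => decide (i ≠ k))).map (fun i => PySem.List.pyGetD row i 0)) := by
  intro m
  induction m with
  | zero =>
    intro a last inc ha hm
    rw [PySem.List.pyRange_one_eq_nil (by omega)]
    simp [pvAloop, chainA]
  | succ m ih =>
    intro a last inc ha hm
    rw [PySem.List.pyRange_one_cons (by omega)]
    by_cases hk : a = k
    · have hfil : (a :: PySem.List.pyRange (a+1) row.length 1).filter (fun i => decide (i ≠ k)) =
        (PySem.List.pyRange (a+1) row.length 1).filter (fun i => decide (i ≠ k)) := by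
        simp [hk]
      subst hk
      rw [hfil, pvAloop_cons_eq]
      exact ih (a+1) last inc (by omega) (by omega)
    · have hfil : (a :: PySem.List.pyRange (a+1) row.length 1).filter (fun i => decide (i ≠ k)) =
        a :: (PySem.List.pyRange (a+1) row.length 1).filter (fun i => decide (i ≠ k)) := by
        simp [hk]
      rw [hfil, List.map_cons, pvAloop_cons_ne row k last a inc _ hk, chainA_cons]
      congr 1
      funext inc'
      exact ih (a+1) (PySem.List.pyGetD row a 0) inc' (by omega) (by omega)

-- the filter is trivial when k is outside [a, b)
theorem filter_ne_of_out (a b k : Int) (h : k < a ∨ b ≤ k) :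
    (PySem.List.pyRange a b 1).filter (fun i => decide (i ≠ k)) = PySem.List.pyRange a b 1 := by
  apply List.filter_eq_self.2
  intro x hx
  rw [PySem.List.mem_pyRange_one] at hx
  simp only [decide_eq_true_eq]
  omega

-- splitting the filtered range at k when a ≤ k < b
theorem filter_ne_split (a b k : Int) (h1 : a ≤ k) (h2 : k < b) :
    (PySem.List.pyRange a b 1).filter (fun i => decide (i ≠ k)) =
      PySem.List.pyRange a k 1 ++ PySem.List.pyRange (k + 1) b 1 := by
  rw [PySem.List.pyRange_one_append a k b h1 (by omega),
    PySem.List.pyRange_one_cons h2, List.filter_append, List.filter_cons,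
    filter_ne_of_out a k k (by omega), filter_ne_of_out (k + 1) b k (by omega)]
  simp

-- mapping the indexing function over a range is a drop/take of the list
theorem map_getD_range (row : List Int) :
    ∀ (m : Nat) (a b : Int), 0 ≤ a → b ≤ (row.length : Int) → (b - a).toNat = m →
      (PySem.List.pyRange a b 1).map (fun i => PySem.List.pyGetD row i 0) =
        (row.drop a.toNat).take (b - a).toNat := by
  intro m
  induction m with
  | zero =>
    intro a b ha hb hm
    rw [PySem.List.pyRange_one_eq_nil (by omega)]
    simp [hm]
  | succ m ih =>
    intro a b ha hb hm
    rw [PySem.List.pyRange_one_cons (by omega), List.map_cons,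
      ih (a + 1) b (by omega) hb (by omega)]
    have hlt : a < (row.length : Int) := by omega
    rw [PySem.List.pyGetD_eq_getElem row 0 ha hlt]
    have hd : row.drop a.toNat = row[a.toNat] :: row.drop (a.toNat + 1) := by
      rw [List.drop_eq_getElem_cons (by omega)]
    rw [hd]
    have h1 : (a + 1).toNat = a.toNat + 1 := by omega
    have h2 : (b - a).toNat = (b - (a + 1)).toNat + 1 := by omega
    rw [h1, h2, List.take_succ_cons]

-- chainA with a fixed upward direction is "all diffs in [1,3]"
theorem chainA_up (rest : List Int) : ∀ last,
    chainA last (some 1) rest = chk (fun d => decide (1 ≤ d ∧ d ≤ 3)) (last :: rest) := by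
  induction rest with
  | nil => intro last; simp [chainA, chk]
  | cons cur rest ih =>
    intro last
    rw [chk_cons₂]
    by_cases h1 : last = cur
    · simp [chainA, h1]
    · by_cases h2 : |cur - last| > 3
      · have h2' : cur - last > 3 ∨ cur - last < -3 := by
          rcases abs_cases (cur - last) with ⟨h, _⟩ | ⟨h, _⟩ <;> omega
        have hn : (decide (1 ≤ cur - last ∧ cur - last ≤ 3)) = false := by simp; omega
        simp only [chainA, if_neg h1, if_pos h2, hn, Bool.false_and]
      · have h2' : -3 ≤ cur - last ∧ cur - last ≤ 3 := abs_le.mp (by omega)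
        by_cases h3 : last < cur
        · have hy : (decide (1 ≤ cur - last ∧ cur - last ≤ 3)) = true := by simp; omega
          simp only [chainA, if_neg h1, if_neg h2, if_pos h3, hy, Bool.true_and]
          rw [if_neg (by omega : ¬ ((1:Int) * 1 ≤ 0))]
          exact ih cur
        · have hn : (decide (1 ≤ cur - last ∧ cur - last ≤ 3)) = false := by simp; omega
          simp only [chainA, if_neg h1, if_neg h2, if_neg h3, hn, Bool.false_and]
          rw [if_pos (by omega : ((1:Int) * (-1) ≤ 0))]

-- chainA with a fixed downward direction is "all diffs in [-3,-1]"
theorem chainA_down (rest : List Int) : ∀ last,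
    chainA last (some (-1)) rest = chk (fun d => decide (-3 ≤ d ∧ d ≤ -1)) (last :: rest) := by
  induction rest with
  | nil => intro last; simp [chainA, chk]
  | cons cur rest ih =>
    intro last
    rw [chk_cons₂]
    by_cases h1 : last = cur
    · simp [chainA, h1]
    · by_cases h2 : |cur - last| > 3
      · have h2' : cur - last > 3 ∨ cur - last < -3 := by
          rcases abs_cases (cur - last) with ⟨h, _⟩ | ⟨h, _⟩ <;> omega
        have hn : (decide (-3 ≤ cur - last ∧ cur - last ≤ -1)) = false := by simp; omega
        simp only [chainA, if_neg h1, if_pos h2, hn, Bool.false_and]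
      · have h2' : -3 ≤ cur - last ∧ cur - last ≤ 3 := abs_le.mp (by omega)
        by_cases h3 : last < cur
        · have hn : (decide (-3 ≤ cur - last ∧ cur - last ≤ -1)) = false := by simp; omega
          simp only [chainA, if_neg h1, if_neg h2, if_pos h3, hn, Bool.false_and]
          rw [if_pos (by omega : ((-1:Int) * 1 ≤ 0))]
        · have hy : (decide (-3 ≤ cur - last ∧ cur - last ≤ -1)) = true := by simp; omega
          simp only [chainA, if_neg h1, if_neg h2, if_neg h3, hy, Bool.true_and]
          rw [if_neg (by omega : ¬ ((-1:Int) * (-1) ≤ 0))]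
          exact ih cur

-- chainA with no direction yet = "all up" or "all down"
theorem chainA_none (last : Int) (rest : List Int) :
    chainA last none rest =
      (chk (fun d => decide (1 ≤ d ∧ d ≤ 3)) (last :: rest) ||
       chk (fun d => decide (-3 ≤ d ∧ d ≤ -1)) (last :: rest)) := by
  cases rest with
  | nil => simp [chainA, chk]
  | cons cur rest =>
    rw [chk_cons₂, chk_cons₂]
    by_cases h1 : last = cur
    · simp [chainA, h1]
    · by_cases h2 : |cur - last| > 3
      · have h2' : cur - last > 3 ∨ cur - last < -3 := by
          rcases abs_cases (cur - last) with ⟨h, _⟩ | ⟨h, _⟩ <;> omega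
        have hu : (decide (1 ≤ cur - last ∧ cur - last ≤ 3)) = false := by simp; omega
        have hd : (decide (-3 ≤ cur - last ∧ cur - last ≤ -1)) = false := by simp; omega
        simp only [chainA, if_neg h1, if_pos h2, hu, hd, Bool.false_and, Bool.or_self]
      · have h2' : -3 ≤ cur - last ∧ cur - last ≤ 3 := abs_le.mp (by omega)
        by_cases h3 : last < cur
        · have hu : (decide (1 ≤ cur - last ∧ cur - last ≤ 3)) = true := by simp; omega
          have hd : (decide (-3 ≤ cur - last ∧ cur - last ≤ -1)) = false := by simp; omega
          simp only [chainA, if_neg h1, if_neg h2, if_pos h3, hu, hd, Bool.true_and,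
            Bool.false_and, Bool.or_false]
          exact chainA_up rest cur
        · have hu : (decide (1 ≤ cur - last ∧ cur - last ≤ 3)) = false := by simp; omega
          have hd : (decide (-3 ≤ cur - last ∧ cur - last ≤ -1)) = true := by simp; omega
          simp only [chainA, if_neg h1, if_neg h2, if_neg h3, hu, hd, Bool.true_and,
            Bool.false_and, Bool.false_or]
          exact chainA_down rest cur

-- the zipped-differences "all" in port B is chk
theorem zip_diffs_all (p : Int → Bool) (l : List Int) :
    ((l.zip l.tail).map (fun q => q.2 - q.1)).all p = chk p l := by
  induction l with
  | nil => simp [chk]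
  | cons a t ih =>
    cases t with
    | nil => simp [chk]
    | cons b r =>
      rw [chk_cons₂, ← ih]
      simp

-- port B computes chainA of the head and tail of its sequence
theorem alt_eq_chainA (row : List Int) (k last : Int) (rest : List Int)
    (hseq : (if k > 0 then
        PySem.List.slice row none (some k) ++ PySem.List.slice row (some (k + 1)) none
      else PySem.List.slice row (some 1) none) = last :: rest) :
    isRowSafeWithSkip_alt row k = chainA last none rest := by
  unfold isRowSafeWithSkip_alt
  simp only [PySem.List.slice_from_one] at hseq ⊢
  rw [hseq, zip_diffs_all, zip_diffs_all, chainA_none]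

-- ===== VERDICT (by name: the statement is the Claim_ definition above) =====
theorem isRowSafeWithSkip_spec : Claim_equal_isRowSafeWithSkip := by
  intro row k _ hpre
  unfold Spec_isRowSafeWithSkip
  unfold Pre_isRowSafeWithSkip at hpre
  by_cases hk : 0 < k
  · -- start index 0
    rw [if_pos hk] at hpre
    obtain ⟨r0, rr, hrow⟩ : ∃ r0 rr, row = r0 :: rr := by
      cases row with
      | nil => exact absurd rfl hpre
      | cons a t => exact ⟨a, t, rfl⟩
    have hlen : 1 ≤ (row.length : Int) := by rw [hrow]; simp
    unfold isRowSafeWithSkip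
    simp only [if_pos hk]
    rw [show PySem.List.pyGet? row 0 = some r0 by rw [hrow, PySem.List.pyGet?_zero_cons]]
    rw [show (0 : Int) + 1 = 1 by norm_num]
    show pvAloop row k r0 none (PySem.List.pyRange 1 row.length 1) = isRowSafeWithSkip_alt row k
    rw [pvAloop_eq_chainA row k (((row.length : Int) - 1).toNat) 1 r0 none (by omega) rfl]
    by_cases hkn : k < (row.length : Int)
    · -- the skipped index lies inside the loop range
      rw [filter_ne_split 1 row.length k (by omega) hkn, List.map_append,
        map_getD_range row (k - 1).toNat 1 k (by omega) (by omega) rfl,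
        map_getD_range row ((row.length : Int) - (k + 1)).toNat (k + 1) row.length (by omega)
          (by omega) rfl]
      rw [List.take_of_length_le (l := row.drop (k + 1).toNat) (by simp only [List.length_drop]; omega)]
      apply (alt_eq_chainA row k r0 _ ?_).symm
      rw [if_pos hk, PySem.List.slice_to row (by omega : (0:Int) ≤ k),
        PySem.List.slice_from row (by omega : (0:Int) ≤ k + 1)]
      have htake : row.take k.toNat = r0 :: (row.drop (1:Int).toNat).take (k - 1).toNat := by
        rw [hrow]
        simp only [Int.toNat_one, List.drop_one, List.tail_cons]
        rw [show k.toNat = (k - 1).toNat + 1 by omega, List.take_succ_cons]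
      rw [htake, List.cons_append]
    · -- skipped index at or past the end: nothing skipped
      rw [filter_ne_of_out 1 row.length k (by omega),
        map_getD_range row ((row.length : Int) - 1).toNat 1 row.length (by omega) (by omega) rfl]
      rw [List.take_of_length_le (l := row.drop (1:Int).toNat) (by simp only [List.length_drop]; omega)]
      apply (alt_eq_chainA row k r0 _ ?_).symm
      rw [if_pos hk, PySem.List.slice_to row (by omega : (0:Int) ≤ k),
        PySem.List.slice_from row (by omega : (0:Int) ≤ k + 1)]
      have h1 : row.take k.toNat = row := by
        rw [List.take_of_length_le]; omega
      have h2 : row.drop (k + 1).toNat = [] := by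
        rw [List.drop_eq_nil_iff]; omega
      rw [h1, h2, List.append_nil, hrow]
      rfl
  · -- start index 1; k ≤ 0 never equals a loop index
    rw [if_neg hk] at hpre
    obtain ⟨r0, r1, rr, hrow⟩ : ∃ r0 r1 rr, row = r0 :: r1 :: rr := by
      cases row with
      | nil => simp at hpre
      | cons a t =>
        cases t with
        | nil => simp at hpre
        | cons b u => exact ⟨a, b, u, rfl⟩
    have hlen : 2 ≤ (row.length : Int) := by omega
    unfold isRowSafeWithSkip
    simp only [if_neg hk]
    rw [show PySem.List.pyGet? row 1 = some r1 by
      rw [hrow, show (1:Int) = ((1:Nat):Int) by norm_num, PySem.List.pyGet?_natCast]; rfl]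
    rw [show (1 : Int) + 1 = 2 by norm_num]
    show pvAloop row k r1 none (PySem.List.pyRange 2 row.length 1) = isRowSafeWithSkip_alt row k
    rw [pvAloop_eq_chainA row k (((row.length : Int) - 2).toNat) 2 r1 none (by omega) rfl]
    rw [filter_ne_of_out 2 row.length k (by omega),
      map_getD_range row ((row.length : Int) - 2).toNat 2 row.length (by omega) (by omega) rfl]
    rw [List.take_of_length_le (l := row.drop (2:Int).toNat) (by simp only [List.length_drop]; omega)]
    apply (alt_eq_chainA row k r1 _ ?_).symm
    rw [if_neg hk, PySem.List.slice_from_one, hrow]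
    rfl
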